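-- pv_equiv track=rewrite | github.com/DanaMC18/advent_of_code | 2021/day_03/main.py | _get_epsilon_gamma_rates
-- ===== SOURCE A (Python) =====
-- from typing import List, Tuple
--
-- def _get_epsilon_gamma_rates(input: List[str]) -> Tuple[str, str]:
--     """Determine epsilon (min) and gamma (max) rates from input."""
--     epsilon = gamma = ''
--     size = len(input[0])
--
--     for i in range(size):
--         bit_list = list()
--
--         for num in input:
--             bit = num[i]
--             bit_list.append(bit)
--
--         zero_count = bit_list.count('0')
--         one_count = bit_list.count('1')
--
--         epsilon += '1' if zero_count > one_count else '0'
--         gamma += '0' if zero_count > one_count else '1'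
--
--     return epsilon, gamma
-- ===== SOURCE B (Python) =====
-- from typing import List, Tuple
--
--
-- def _get_epsilon_gamma_rates(input: List[str]) -> Tuple[str, str]:
--     """Determine epsilon (min) and gamma (max) rates from input."""
--     size = len(input[0])
--     counts = [(0, 0)] * size
--
--     for num in input:
--         counts = [(z + (c == '0'), o + (c == '1')) for (z, o), c in zip(counts, num)]
--
--     epsilon = ''.join('1' if z > o else '0' for z, o in counts)
--     gamma = ''.join('0' if z > o else '1' for z, o in counts)
--     return epsilon, gamma
-- ===== Notes on version B (the rewrite author's own statement) =====
-- stated objective: alternative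
-- what changed: Replaced A's column-major nested scan (for each column, rebuild a bit_list over all rows and count it twice) by a single row-major pass maintaining a per-column (zeros, ones) counts table, then emitting both rate strings from the table with joins.
import Mathlib
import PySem

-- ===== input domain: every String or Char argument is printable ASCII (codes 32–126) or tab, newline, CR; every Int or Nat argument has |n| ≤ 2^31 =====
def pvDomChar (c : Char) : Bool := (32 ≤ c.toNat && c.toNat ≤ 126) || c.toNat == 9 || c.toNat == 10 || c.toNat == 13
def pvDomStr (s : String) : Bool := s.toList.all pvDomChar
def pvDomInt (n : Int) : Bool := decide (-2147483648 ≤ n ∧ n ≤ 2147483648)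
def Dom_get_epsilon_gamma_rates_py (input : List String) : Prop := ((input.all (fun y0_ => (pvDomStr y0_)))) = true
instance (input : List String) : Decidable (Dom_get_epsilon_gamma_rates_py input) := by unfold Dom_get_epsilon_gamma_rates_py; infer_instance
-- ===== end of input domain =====

-- B replaces A's column-major double scan (rebuild a bit_list per column, count it twice)
-- by a single row-major pass maintaining a per-column (zeros, ones) counts table; objective: alternative.


-- ===== PORT A =====
def get_epsilon_gamma_rates_py (input : List String) : String × String :=
  let size := PySem.Str.len ((PySem.List.pyGet? input 0).getD "")   -- input[0] raises on []; Pre_ excludes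
  (PySem.List.pyRange 0 size 1).foldl (fun (eg : String × String) i =>
    let bit_list := input.foldl (fun bl num =>
      bl ++ [(PySem.Str.pyGet? num i).getD ' ']) ([] : List Char)   -- num[i] in range under Pre_
    let zero_count := PySem.List.count bit_list '0'
    let one_count := PySem.List.count bit_list '1'
    (eg.1 ++ (if zero_count > one_count then "1" else "0"),
     eg.2 ++ (if zero_count > one_count then "0" else "1"))) ("", "")

-- ===== PORT B =====
-- one zip step: counts updated pointwise by the row's chars (zip truncates at the shorter list)
def pvAltStep : List (Nat × Nat) → List Char → List (Nat × Nat)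
  | (z, o) :: rest, c :: cs =>
      (z + (if c = '0' then 1 else 0), o + (if c = '1' then 1 else 0)) :: pvAltStep rest cs
  | _, _ => []

def get_epsilon_gamma_rates_py_alt (input : List String) : String × String :=
  let size := PySem.Str.len ((PySem.List.pyGet? input 0).getD "")
  let counts := input.foldl (fun cts num => pvAltStep cts num.toList)
    (List.replicate size.toNat ((0 : Nat), (0 : Nat)))
  (PySem.Str.join "" (counts.map fun p => if p.1 > p.2 then "1" else "0"),
   PySem.Str.join "" (counts.map fun p => if p.1 > p.2 then "0" else "1"))

-- ===== PRECONDITION & SPEC =====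
-- Pre_ excludes exactly where A raises: empty input (input[0] → IndexError) and rows shorter
-- than the first row (num[i] → IndexError).
def Pre_get_epsilon_gamma_rates_py (input : List String) : Prop :=
  input ≠ [] ∧ ∀ s ∈ input, (input.headD "").toList.length ≤ s.toList.length
instance (input : List String) : Decidable (Pre_get_epsilon_gamma_rates_py input) := by
  unfold Pre_get_epsilon_gamma_rates_py; infer_instance

def pvWitness_get_epsilon_gamma_rates_py : List String := ["0110", "1010", "1111"]

def Spec_get_epsilon_gamma_rates_py (input : List String) (out : String × String) : Prop := out = get_epsilon_gamma_rates_py_alt input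
instance (input : List String) (out : String × String) : Decidable (Spec_get_epsilon_gamma_rates_py input out) := by unfold Spec_get_epsilon_gamma_rates_py; infer_instance

-- ===== CLAIM (what is proved, stated in full; the proofs are below) =====
def Claim_equal_get_epsilon_gamma_rates_py : Prop := ∀ (input : List String), Dom_get_epsilon_gamma_rates_py input → Pre_get_epsilon_gamma_rates_py input → Spec_get_epsilon_gamma_rates_py input (get_epsilon_gamma_rates_py input)

-- ===== LEMMAS AND PROOFS =====

-- the k-th column of the input, read with a default (always in range under Pre_)
def pvCol (input : List String) (k : Nat) : List Char :=
  input.map (fun s => s.toList.getD k ' ')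

theorem pvAltStep_length (counts : List (Nat × Nat)) (cs : List Char)
    (h : counts.length ≤ cs.length) : (pvAltStep counts cs).length = counts.length := by
  induction counts generalizing cs with
  | nil => cases cs <;> simp [pvAltStep]
  | cons p rest ih =>
    obtain ⟨z, o⟩ := p
    cases cs with
    | nil => simp at h
    | cons c cs' => simp [pvAltStep]; exact ih cs' (by simpa using h)

theorem pvAltStep_getElem (counts : List (Nat × Nat)) (cs : List Char) (k : Nat)
    (hk : k < counts.length) (h : counts.length ≤ cs.length) :
    (pvAltStep counts cs)[k]'(by rw [pvAltStep_length counts cs h]; exact hk) =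
      ((counts[k]'hk).1 + (if cs.getD k ' ' = '0' then 1 else 0),
       (counts[k]'hk).2 + (if cs.getD k ' ' = '1' then 1 else 0)) := by
  induction counts generalizing cs k with
  | nil => simp at hk
  | cons p rest ih =>
    obtain ⟨z, o⟩ := p
    cases cs with
    | nil => simp at h
    | cons c cs' =>
      cases k with
      | zero => simp [pvAltStep]
      | succ k' => simpa [pvAltStep] using ih cs' k' (by simpa using hk) (by simpa using h)

theorem pvFold_getElem (input : List String) (counts : List (Nat × Nat)) (k : Nat)
    (h : ∀ s ∈ input, counts.length ≤ s.toList.length) (hk : k < counts.length) :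
    ∃ (hl : (input.foldl (fun cts num => pvAltStep cts num.toList) counts).length = counts.length),
      (input.foldl (fun cts num => pvAltStep cts num.toList) counts)[k]'(by rw [hl]; exact hk) =
        ((counts[k]'hk).1 + (pvCol input k).count '0',
         (counts[k]'hk).2 + (pvCol input k).count '1') := by
  induction input generalizing counts with
  | nil => exact ⟨rfl, by simp [pvCol]⟩
  | cons num rest ih =>
    have hnum : counts.length ≤ num.toList.length := h num (by simp)
    have hlen := pvAltStep_length counts num.toList hnum
    have hrest : ∀ s ∈ rest, (pvAltStep counts num.toList).length ≤ s.toList.length := by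
      intro s hs; rw [hlen]; exact h s (by simp [hs])
    obtain ⟨hl, hg⟩ := ih (pvAltStep counts num.toList) hrest (by rw [hlen]; exact hk)
    refine ⟨by rw [List.foldl_cons, hl, hlen], ?_⟩
    simp only [List.foldl_cons]
    rw [hg, pvAltStep_getElem counts num.toList k hk hnum]
    simp [pvCol, List.count_cons]
    constructor <;> · split <;> omega

theorem pvFold_length (input : List String) (counts : List (Nat × Nat))
    (h : ∀ s ∈ input, counts.length ≤ s.toList.length) :
    (input.foldl (fun cts num => pvAltStep cts num.toList) counts).length = counts.length := by
  induction input generalizing counts with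
  | nil => rfl
  | cons num rest ih =>
    have hnum := pvAltStep_length counts num.toList (h num (by simp))
    rw [List.foldl_cons, ih _ (fun s hs => by rw [hnum]; exact h s (by simp [hs])), hnum]

-- A's pair-of-strings accumulation, read on .toList
theorem pvFoldl_pair (l : List Int) (f g : Int → String) (a b : String) :
    l.foldl (fun (eg : String × String) i => (eg.1 ++ f i, eg.2 ++ g i)) (a, b)
      = (String.ofList (a.toList ++ l.flatMap (fun i => (f i).toList)),
         String.ofList (b.toList ++ l.flatMap (fun i => (g i).toList))) := by
  induction l generalizing a b with
  | nil => simp [String.ofList]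
  | cons x xs ih =>
    rw [List.foldl_cons, ih (a ++ f x) (b ++ g x)]
    simp

theorem pvFlat_toList (l : List Int) (C : Int → Prop) [DecidablePred C] (sx sy : String)
    (x y : Char) (hx : sx.toList = [x]) (hy : sy.toList = [y]) :
    l.flatMap (fun i => (if C i then sx else sy).toList)
      = l.map (fun i => if C i then x else y) := by
  induction l with
  | nil => rfl
  | cons z zs ih =>
    simp only [List.flatMap_cons, List.map_cons, ih]
    by_cases h : C z <;> simp [h, hx, hy]

theorem pvJoin_toList (cnts : List (Nat × Nat)) (sx sy : String) (x y : Char)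
    (hx : sx.toList = [x]) (hy : sy.toList = [y]) :
    (PySem.Str.join "" (cnts.map (fun p => if p.1 > p.2 then sx else sy))).toList
      = cnts.map (fun p => if p.1 > p.2 then x else y) := by
  rw [PySem.Str.toList_join, List.map_map]
  have h1 : (String.toList ∘ fun p : Nat × Nat => if p.1 > p.2 then sx else sy)
      = fun p : Nat × Nat => [if p.1 > p.2 then x else y] := by
    funext p; by_cases h : p.1 > p.2 <;> simp [h, hx, hy]
  have h2 : (fun p : Nat × Nat => [if p.1 > p.2 then x else y])
      = (fun c => [c]) ∘ (fun p : Nat × Nat => if p.1 > p.2 then x else y) := rfl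
  rw [h1, h2, ← List.map_map]
  have h0 : ("" : String).toList = [] := rfl
  rw [h0, PySem.Chars.join_nil_singletons]

-- ===== VERDICT (by name: the statement is the Claim_ definition above) =====
theorem get_epsilon_gamma_rates_py_spec : Claim_equal_get_epsilon_gamma_rates_py := by
  intro input _ hpre
  obtain ⟨hne, hlen⟩ := hpre
  unfold Spec_get_epsilon_gamma_rates_py
  obtain ⟨s0, rest, rfl⟩ : ∃ s0 rest, input = s0 :: rest := by
    cases input with
    | nil => exact absurd rfl hne
    | cons s0 rest => exact ⟨s0, rest, rfl⟩
  have hlen : ∀ s ∈ s0 :: rest, s0.toList.length ≤ s.toList.length := by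
    intro s hs
    simpa using hlen s hs
  have hflen : (List.foldl (fun cts num => pvAltStep cts num.toList)
      (List.replicate s0.toList.length ((0 : Nat), (0 : Nat))) (s0 :: rest)).length
        = s0.toList.length := by
    rw [pvFold_length (s0 :: rest) _ (by simpa using hlen)]; simp
  have hcounts : List.foldl (fun cts num => pvAltStep cts num.toList)
        (List.replicate s0.toList.length ((0 : Nat), (0 : Nat))) (s0 :: rest)
      = (List.range s0.toList.length).map
          (fun k => ((pvCol (s0 :: rest) k).count '0', (pvCol (s0 :: rest) k).count '1')) := by
    apply List.ext_getElem (by rw [hflen]; simp)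
    intro k h1 h2
    rw [hflen] at h1
    obtain ⟨_, hg⟩ := pvFold_getElem (s0 :: rest) (List.replicate s0.toList.length (0, 0)) k
      (by simpa using hlen) (by simpa using h1)
    simp only [List.getElem_map, List.getElem_range]
    simpa using hg
  simp only [get_epsilon_gamma_rates_py, get_epsilon_gamma_rates_py_alt,
    PySem.List.pyGet?_zero_cons, Option.getD_some, PySem.Str.len_eq, Int.toNat_natCast]
  rw [pvFoldl_pair, hcounts]
  rw [Prod.mk.injEq]
  constructor <;>
  · apply String.toList_inj.mp
    rw [String.toList_ofList]
    rw [pvFlat_toList _ _ _ _ _ _ rfl rfl]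
    rw [pvJoin_toList _ _ _ _ _ rfl rfl]
    rw [PySem.List.pyRange_one, List.map_map, List.map_map]
    simp only [Int.sub_zero, Int.toNat_natCast]
    refine List.map_congr_left fun k hk => ?_
    rw [List.mem_range] at hk
    simp only [Function.comp]
    rw [PySem.List.foldl_append_singleton_eq_map]
    simp [PySem.List.count_eq, pvCol, List.getD_eq_getElem?_getD]
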